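-- pv_equiv track=rewrite | github.com/RiseCai/awesome_project | script/5_implementation/smart_commit.py | categorize_changes
-- ===== SOURCE A (Python) =====
-- def categorize_changes(changes):
--     categories = {
--         'Added': [],
--         'Modified': [],
--         'Deleted': [],
--         'Renamed': [],
--         'Untracked': []
--     }
--     for change in changes:
--         if change:
--             status, filename = change.split(' ', 1)
--             if status == 'A':
--                 categories['Added'].append(filename)
--             elif status == 'M':
--                 categories['Modified'].append(filename)
--             elif status == 'D':
--                 categories['Deleted'].append(filename)
--             elif status == 'R':
--                 categories['Renamed'].append(filename)
--             elif status == '??':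
--                 categories['Untracked'].append(filename)
--     return categories
-- ===== SOURCE B (Python) =====
-- def categorize_changes(changes):
--     statuses = [('Added', 'A'), ('Modified', 'M'), ('Deleted', 'D'),
--                 ('Renamed', 'R'), ('Untracked', '??')]
--     return {name: [c[c.index(' ') + 1:] for c in changes
--                    if c and c[:c.index(' ')] == s]
--             for name, s in statuses}
-- ===== Notes on version B (the rewrite author's own statement) =====
-- stated objective: alternative
-- what changed: B never splits and never dispatches on a parsed status: it builds each of the five category lists by one filtering pass that compares the text before the first space (located with str.index) against that status and keeps the slice after it, instead of A's single loop that splits every entry and appends to a pre-built dict through an if/elif chain.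
import Mathlib
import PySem

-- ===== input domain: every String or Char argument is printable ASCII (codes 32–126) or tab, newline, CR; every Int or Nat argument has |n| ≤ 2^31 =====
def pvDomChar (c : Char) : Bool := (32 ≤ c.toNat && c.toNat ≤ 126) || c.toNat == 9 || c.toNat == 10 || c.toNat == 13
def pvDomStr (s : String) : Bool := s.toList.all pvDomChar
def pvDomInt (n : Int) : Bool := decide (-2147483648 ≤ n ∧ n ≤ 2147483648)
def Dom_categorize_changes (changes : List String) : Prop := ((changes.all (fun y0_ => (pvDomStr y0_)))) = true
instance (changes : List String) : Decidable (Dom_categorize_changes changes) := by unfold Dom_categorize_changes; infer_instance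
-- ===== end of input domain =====

-- B never splits and never dispatches on a parsed status: each category list is built by one
-- filtering pass that compares the text before the first space (found with index) against that
-- status and slices off everything after it (objective: alternative; same cost).

-- ===== PORT A =====
-- the loop body: 'if change: status, filename = change.split(' ', 1); …'
-- split(' ', 1) is PySem.Str.splitMax?; the separator " " is nonempty so getD [] is exact.
-- The match fallback (a 1-part split) is where Python raises ValueError on unpacking — excluded by Pre_.
def stepA (cats : PySem.Dict String (List String)) (change : String) : PySem.Dict String (List String) :=
  if change ≠ "" then
    match (PySem.Str.splitMax? change " " 1).getD [] with
    | [status, filename] =>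
      if status = "A" then cats.modify "Added" [] (fun l => l ++ [filename])
      else if status = "M" then cats.modify "Modified" [] (fun l => l ++ [filename])
      else if status = "D" then cats.modify "Deleted" [] (fun l => l ++ [filename])
      else if status = "R" then cats.modify "Renamed" [] (fun l => l ++ [filename])
      else if status = "??" then cats.modify "Untracked" [] (fun l => l ++ [filename])
      else cats
    | _ => cats
  else cats

def categorize_changes (changes : List String) : List (String × List String) :=
  (changes.foldl stepA (PySem.Dict.ofList
    [("Added", []), ("Modified", []), ("Deleted", []), ("Renamed", []), ("Untracked", [])])).items

-- ===== PORT B =====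
-- statuses = [('Added', 'A'), …, ('Untracked', '??')]
def statusTable : List (String × String) :=
  [("Added", "A"), ("Modified", "M"), ("Deleted", "D"), ("Renamed", "R"), ("Untracked", "??")]

-- [c[c.index(' ') + 1:] for c in changes if c and c[:c.index(' ')] == s]
-- c.index(' ') is PySem.Str.find; it raises ValueError where find = -1, i.e. on a non-empty
-- change without a space — exactly where A raises too, so those inputs sit outside Pre_.
def pickStatus (changes : List String) (s : String) : List String :=
  (changes.filter (fun c =>
      decide (c ≠ "") && (PySem.Str.slice c none (some (PySem.Str.find c " ")) == s))).map
    (fun c => PySem.Str.slice c (some (PySem.Str.find c " " + 1)) none)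

-- {name: [...] for name, s in statuses}
def categorize_changes_alt (changes : List String) : List (String × List String) :=
  statusTable.map (fun ns => (ns.1, pickStatus changes ns.2))

-- ===== PRECONDITION & SPEC =====
-- Pre_ excludes inputs containing a non-empty change without a space: there Python A raises
-- ValueError on tuple unpacking (and Python B raises ValueError from index).
def Pre_categorize_changes (changes : List String) : Prop :=
  ∀ s ∈ changes, s ≠ "" → ' ' ∈ s.toList
instance (changes : List String) : Decidable (Pre_categorize_changes changes) := by
  unfold Pre_categorize_changes; infer_instance
def pvWitness_categorize_changes : List String := ["A f.py", "", "?? a b", "X y"]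

def Spec_categorize_changes (changes : List String) (out : List (String × List String)) : Prop := out = categorize_changes_alt changes
instance (changes : List String) (out : List (String × List String)) : Decidable (Spec_categorize_changes changes out) := by unfold Spec_categorize_changes; infer_instance

-- ===== CLAIM (what is proved, stated in full; the proofs are below) =====
def Claim_equal_categorize_changes : Prop := ∀ (changes : List String), Dom_categorize_changes changes → Pre_categorize_changes changes → Spec_categorize_changes changes (categorize_changes changes)

-- ===== LEMMAS AND PROOFS =====

-- the dict with its five fixed keys, abstracted over the five value lists
def dcat (a m d r u : List String) : PySem.Dict String (List String) :=
  PySem.Dict.ofList [("Added", a), ("Modified", m), ("Deleted", d), ("Renamed", r), ("Untracked", u)]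

theorem dcat_items (a m d r u : List String) :
    (dcat a m d r u).items = [("Added", a), ("Modified", m), ("Deleted", d), ("Renamed", r), ("Untracked", u)] := by
  simp [dcat, PySem.Dict.ofList, PySem.Dict.update, PySem.Dict.insert, PySem.Dict.empty, PySem.Dict.contains]

theorem dcat_modify_A (a m d r u : List String) (f : String) :
    (dcat a m d r u).modify "Added" [] (fun l => l ++ [f]) = dcat (a ++ [f]) m d r u := by
  apply PySem.Dict.ext
  simp [dcat, PySem.Dict.ofList, PySem.Dict.update, PySem.Dict.insert, PySem.Dict.empty,
    PySem.Dict.contains, PySem.Dict.modify, PySem.Dict.getD, PySem.Dict.get?]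

theorem dcat_modify_M (a m d r u : List String) (f : String) :
    (dcat a m d r u).modify "Modified" [] (fun l => l ++ [f]) = dcat a (m ++ [f]) d r u := by
  apply PySem.Dict.ext
  simp [dcat, PySem.Dict.ofList, PySem.Dict.update, PySem.Dict.insert, PySem.Dict.empty,
    PySem.Dict.contains, PySem.Dict.modify, PySem.Dict.getD, PySem.Dict.get?]

theorem dcat_modify_D (a m d r u : List String) (f : String) :
    (dcat a m d r u).modify "Deleted" [] (fun l => l ++ [f]) = dcat a m (d ++ [f]) r u := by
  apply PySem.Dict.ext
  simp [dcat, PySem.Dict.ofList, PySem.Dict.update, PySem.Dict.insert, PySem.Dict.empty,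
    PySem.Dict.contains, PySem.Dict.modify, PySem.Dict.getD, PySem.Dict.get?]

theorem dcat_modify_R (a m d r u : List String) (f : String) :
    (dcat a m d r u).modify "Renamed" [] (fun l => l ++ [f]) = dcat a m d (r ++ [f]) u := by
  apply PySem.Dict.ext
  simp [dcat, PySem.Dict.ofList, PySem.Dict.update, PySem.Dict.insert, PySem.Dict.empty,
    PySem.Dict.contains, PySem.Dict.modify, PySem.Dict.getD, PySem.Dict.get?]

theorem dcat_modify_U (a m d r u : List String) (f : String) :
    (dcat a m d r u).modify "Untracked" [] (fun l => l ++ [f]) = dcat a m d r (u ++ [f]) := by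
  apply PySem.Dict.ext
  simp [dcat, PySem.Dict.ofList, PySem.Dict.update, PySem.Dict.insert, PySem.Dict.empty,
    PySem.Dict.contains, PySem.Dict.modify, PySem.Dict.getD, PySem.Dict.get?]

-- splitOnMax.go with maxsplit budget 0 finishes immediately
theorem go_zero (fuel : Nat) (l cur : List Char) (acc : List (List Char)) :
    PySem.Chars.splitOnMax.go [' '] fuel 0 l cur acc = ((cur.reverse ++ l) :: acc).reverse := by
  cases fuel with
  | zero => simp [PySem.Chars.splitOnMax.go]
  | succ f =>
    cases l with
    | nil => simp [PySem.Chars.splitOnMax.go]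
    | cons c rest => simp [PySem.Chars.splitOnMax.go]

-- splitOnMax.go with budget 1 on a list containing a space: split at the first space
theorem go_one (fuel : Nat) : ∀ (l : List Char), l.length < fuel → ' ' ∈ l →
    ∀ (cur : List Char) (acc : List (List Char)),
    PySem.Chars.splitOnMax.go [' '] fuel 1 l cur acc =
      acc.reverse ++ [cur.reverse ++ l.takeWhile (· ≠ ' '),
        l.drop ((l.takeWhile (· ≠ ' ')).length + 1)] := by
  induction fuel with
  | zero => intro l hlen; omega
  | succ f ih =>
    intro l hlen hmem cur acc
    cases l with
    | nil => simp at hmem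
    | cons c rest =>
      by_cases hc : c = ' '
      · subst hc
        simp [PySem.Chars.splitOnMax.go, List.isPrefixOf, go_zero]
      · have hmem' : ' ' ∈ rest := by
          rcases List.mem_cons.mp hmem with h | h
          · exact absurd h.symm hc
          · exact h
        have hpre : [' '].isPrefixOf (c :: rest) = false := by
          simp [List.isPrefixOf]
          exact fun h => hc h.symm
        simp only [PySem.Chars.splitOnMax.go, hpre]
        rw [show (PySem.Chars.splitOnMax.go [' '] f 1 rest (c :: cur) acc) =
          acc.reverse ++ [(c :: cur).reverse ++ rest.takeWhile (· ≠ ' '),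
            rest.drop ((rest.takeWhile (· ≠ ' ')).length + 1)] from
          ih rest (by simpa using Nat.lt_of_succ_lt_succ hlen) hmem' (c :: cur) acc]
        simp [List.takeWhile_cons, hc]

-- s.split(' ', 1) on a string containing a space = [before first space, after it]
theorem split_eq (c : String) (hs : ' ' ∈ c.toList) :
    (PySem.Str.splitMax? c " " 1).getD [] =
      [String.ofList (c.toList.takeWhile (· ≠ ' ')),
       String.ofList (c.toList.drop ((c.toList.takeWhile (· ≠ ' ')).length + 1))] := by
  have h1 : PySem.Chars.splitOnMax c.toList [' '] 1 =
      [c.toList.takeWhile (· ≠ ' '),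
       c.toList.drop ((c.toList.takeWhile (· ≠ ' ')).length + 1)] := by
    have := go_one (c.toList.length + 1) c.toList (by omega) hs [] []
    simpa [PySem.Chars.splitOnMax] using this
  simp [PySem.Str.splitMax?, PySem.Chars.splitMax?, show (" " : String).toList = [' '] from rfl, h1]

-- String.ofList equality with a literal, via toList
theorem ofList_eq_iff (l : List Char) (s : String) :
    String.ofList l = s ↔ l = s.toList := by
  constructor
  · intro h; rw [← h, String.toList_ofList]
  · intro h; rw [h]; exact String.ofList_toList

theorem tw_lt {p : Char → Bool} (cs : List Char) (c : Char) (hc : c ∈ cs) (hpc : p c = false) :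
    (cs.takeWhile p).length < cs.length := by
  induction cs with
  | nil => simp at hc
  | cons a l ih =>
    by_cases ha : p a = true
    · simp only [List.takeWhile_cons, ha, if_true]
      have hcl : c ∈ l := by
        rcases List.mem_cons.mp hc with h | h
        · rw [h] at hpc; rw [hpc] at ha; simp at ha
        · exact h
      simpa using Nat.succ_lt_succ (ih hcl)
    · simp only [Bool.not_eq_true] at ha ⊢
      simp [ha]
theorem tw_get {p : Char → Bool} (cs : List Char) : ∀ i (h : i < cs.length),
    i < (cs.takeWhile p).length → p (cs[i]'h) = true := by
  induction cs with
  | nil => intro i h; simp at h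
  | cons a l ih =>
    intro i h hlt
    by_cases ha : p a = true
    · cases i with
      | zero => simpa using ha
      | succ j =>
        simp only [List.takeWhile_cons, ha, if_true, List.length_cons] at hlt
        simpa using ih j (by simpa using h) (by omega)
    · simp only [Bool.not_eq_true] at ha
      simp [ha] at hlt
theorem tw_get_end {p : Char → Bool} (cs : List Char) (h : (cs.takeWhile p).length < cs.length) :
    p (cs[(cs.takeWhile p).length]'h) = false := by
  induction cs with
  | nil => simp at h
  | cons a l ih =>
    by_cases ha : p a = true
    · simp only [List.takeWhile_cons, ha, if_true, List.length_cons] at h ⊢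
      simpa using ih (by omega)
    · simp only [Bool.not_eq_true] at ha
      simp [ha]
theorem find_space (cs : List Char) (hs : ' ' ∈ cs) :
    PySem.Chars.find cs [' '] = ((cs.takeWhile (fun x => decide (x ≠ ' '))).length : Int) := by
  have hlt : (cs.takeWhile (fun x => decide (x ≠ ' '))).length < cs.length :=
    tw_lt cs ' ' hs (by simp)
  have hend : cs[(cs.takeWhile (fun x => decide (x ≠ ' '))).length]'hlt = ' ' := by
    have := tw_get_end (p := fun x => decide (x ≠ ' ')) cs hlt
    simpa using this
  have hpre_t : [' '] <+: cs.drop (cs.takeWhile (fun x => decide (x ≠ ' '))).length := by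
    rw [List.drop_eq_getElem_cons hlt, hend]
    exact ⟨_, rfl⟩
  have hnn : 0 ≤ PySem.Chars.find cs [' '] := by
    rw [PySem.Chars.find_nonneg_iff]
    exact (PySem.Chars.isIn_iff_infix _ _).mp
      ((PySem.Chars.exists_prefix_drop_iff_isIn _ _).mp
        ⟨(cs.takeWhile (fun x => decide (x ≠ ' '))).length, hpre_t⟩)
  obtain ⟨hfp, hmin⟩ := PySem.Chars.find_spec hnn
  have h1 : ¬ (cs.takeWhile (fun x => decide (x ≠ ' '))).length < (PySem.Chars.find cs [' ']).toNat :=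
    fun hl => hmin _ hl hpre_t
  have h2 : ¬ (PySem.Chars.find cs [' ']).toNat < (cs.takeWhile (fun x => decide (x ≠ ' '))).length := by
    intro hl
    have hflen : (PySem.Chars.find cs [' ']).toNat < cs.length := by omega
    obtain ⟨rest, hr⟩ := hfp
    have hget : cs[(PySem.Chars.find cs [' ']).toNat]'hflen = ' ' := by
      have h0 : (cs.drop (PySem.Chars.find cs [' ']).toNat)[0]'(by rw [← hr]; simp) = ' ' := by
        simp [← hr]
      rw [List.getElem_drop] at h0
      simpa using h0
    have := tw_get (p := fun x => decide (x ≠ ' ')) cs _ hflen hl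
    rw [hget] at this
    simp at this
  have : (PySem.Chars.find cs [' ']).toNat = (cs.takeWhile (fun x => decide (x ≠ ' '))).length := by omega
  omega


-- the Bool condition of B's filter, for a change containing a space, says: the text before
-- the first space is exactly s
theorem cond_iff (c : String) (hs : ' ' ∈ c.toList) (s : String) :
    ((PySem.Str.slice c none (some (PySem.Str.find c " ")) == s) = true) ↔
      c.toList.takeWhile (fun x => decide (x ≠ ' ')) = s.toList := by
  have hf : PySem.Str.find c " " = ((c.toList.takeWhile (fun x => decide (x ≠ ' '))).length : Int) := by
    rw [PySem.Str.find_eq]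
    exact find_space c.toList hs
  have htake : c.toList.take (c.toList.takeWhile (fun x => decide (x ≠ ' '))).length
      = c.toList.takeWhile (fun x => decide (x ≠ ' ')) := by
    have h := List.take_left (l₁ := c.toList.takeWhile (fun x => decide (x ≠ ' ')))
      (l₂ := c.toList.dropWhile (fun x => decide (x ≠ ' ')))
    rw [List.takeWhile_append_dropWhile] at h
    exact h
  rw [beq_iff_eq, hf]
  simp only [PySem.Str.slice, PySem.Chars.slice_eq_listSlice, PySem.List.slice_to_natCast, htake]
  exact ofList_eq_iff _ _

-- the value B keeps, for a change containing a space: everything after the first space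
theorem val_eq (c : String) (hs : ' ' ∈ c.toList) :
    PySem.Str.slice c (some (PySem.Str.find c " " + 1)) none =
      String.ofList (c.toList.drop ((c.toList.takeWhile (fun x => decide (x ≠ ' '))).length + 1)) := by
  have hf : PySem.Str.find c " " = ((c.toList.takeWhile (fun x => decide (x ≠ ' '))).length : Int) := by
    rw [PySem.Str.find_eq]
    exact find_space c.toList hs
  have hcast : ((c.toList.takeWhile (fun x => decide (x ≠ ' '))).length : Int) + 1 =
      (((c.toList.takeWhile (fun x => decide (x ≠ ' '))).length + 1 : Nat) : Int) := by push_cast; ring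
  rw [hf]
  simp only [PySem.Str.slice, PySem.Chars.slice_eq_listSlice, hcast, PySem.List.slice_from_natCast]

theorem pickStatus_cons (c : String) (cs : List String) (s : String) :
    pickStatus (c :: cs) s =
      if (decide (c ≠ "") && (PySem.Str.slice c none (some (PySem.Str.find c " ")) == s)) = true
      then PySem.Str.slice c (some (PySem.Str.find c " " + 1)) none :: pickStatus cs s
      else pickStatus cs s := by
  unfold pickStatus
  rw [List.filter_cons]
  by_cases h : (decide (c ≠ "") && (PySem.Str.slice c none (some (PySem.Str.find c " ")) == s)) = true
  · rw [if_pos h, if_pos h, List.map_cons]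
  · rw [if_neg h, if_neg h]

theorem pickStatus_nil (s : String) : pickStatus [] s = [] := rfl

-- loop invariant: A's fold over the dict appends exactly B's per-status picks
theorem loopA (cs : List String) (hpre : ∀ s ∈ cs, s ≠ "" → ' ' ∈ s.toList) :
    ∀ a m d r u : List String,
    cs.foldl stepA (dcat a m d r u) =
      dcat (a ++ pickStatus cs "A") (m ++ pickStatus cs "M") (d ++ pickStatus cs "D")
           (r ++ pickStatus cs "R") (u ++ pickStatus cs "??") := by
  induction cs with
  | nil => intro a m d r u; simp [pickStatus_nil]
  | cons c cs ih =>
    have hpre' : ∀ s ∈ cs, s ≠ "" → ' ' ∈ s.toList := fun s hsm => hpre s (List.mem_cons_of_mem _ hsm)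
    intro a m d r u
    by_cases hc : c = ""
    · subst hc
      rw [List.foldl_cons]
      have hstep : stepA (dcat a m d r u) "" = dcat a m d r u := by simp [stepA]
      rw [hstep, ih hpre']
      simp [pickStatus_cons]
    · have hs : ' ' ∈ c.toList := hpre c List.mem_cons_self hc
      have hsplit := split_eq c hs
      set tk := c.toList.takeWhile (fun x => decide (x ≠ ' ')) with htk
      have hbool : ∀ s : String,
          ((decide (c ≠ "") && (PySem.Str.slice c none (some (PySem.Str.find c " ")) == s)) = true)
            ↔ tk = s.toList := by
        intro s
        rw [Bool.and_eq_true]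
        constructor
        · rintro ⟨-, h⟩; exact (cond_iff c hs s).mp h
        · intro h; exact ⟨decide_eq_true hc, (cond_iff c hs s).mpr h⟩
      have hval : PySem.Str.slice c (some (PySem.Str.find c " " + 1)) none =
          String.ofList (c.toList.drop (tk.length + 1)) := val_eq c hs
      rw [List.foldl_cons]
      have hstep : stepA (dcat a m d r u) c =
        (if tk = ['A'] then dcat (a ++ [String.ofList (c.toList.drop (tk.length + 1))]) m d r u
         else if tk = ['M'] then dcat a (m ++ [String.ofList (c.toList.drop (tk.length + 1))]) d r u
         else if tk = ['D'] then dcat a m (d ++ [String.ofList (c.toList.drop (tk.length + 1))]) r u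
         else if tk = ['R'] then dcat a m d (r ++ [String.ofList (c.toList.drop (tk.length + 1))]) u
         else if tk = ['?', '?'] then dcat a m d r (u ++ [String.ofList (c.toList.drop (tk.length + 1))])
         else dcat a m d r u) := by
        simp only [stepA, if_pos (by exact hc), ← htk] at *
        rw [hsplit]
        simp only [ofList_eq_iff, show ("A" : String).toList = ['A'] from rfl,
          show ("M" : String).toList = ['M'] from rfl, show ("D" : String).toList = ['D'] from rfl,
          show ("R" : String).toList = ['R'] from rfl, show ("??" : String).toList = ['?', '?'] from rfl]
        split_ifs with h1 h2 h3 h4 h5 <;>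
          first
            | rw [dcat_modify_A]
            | rw [dcat_modify_M]
            | rw [dcat_modify_D]
            | rw [dcat_modify_R]
            | rw [dcat_modify_U]
            | rfl
      rw [hstep]
      by_cases h1 : tk = ['A']
      · rw [if_pos h1, ih hpre']
        simp only [pickStatus_cons, if_pos ((hbool "A").mpr h1),
          if_neg (show ¬ _ = true by rw [hbool "M", h1]; decide),
          if_neg (show ¬ _ = true by rw [hbool "D", h1]; decide),
          if_neg (show ¬ _ = true by rw [hbool "R", h1]; decide),
          if_neg (show ¬ _ = true by rw [hbool "??", h1]; decide)]
        rw [hval]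
        simp
      · rw [if_neg h1]
        by_cases h2 : tk = ['M']
        · rw [if_pos h2, ih hpre']
          simp only [pickStatus_cons, if_pos ((hbool "M").mpr h2),
            if_neg (show ¬ _ = true by rw [hbool "A", h2]; decide),
            if_neg (show ¬ _ = true by rw [hbool "D", h2]; decide),
            if_neg (show ¬ _ = true by rw [hbool "R", h2]; decide),
            if_neg (show ¬ _ = true by rw [hbool "??", h2]; decide)]
          rw [hval]
          simp
        · rw [if_neg h2]
          by_cases h3 : tk = ['D']
          · rw [if_pos h3, ih hpre']
            simp only [pickStatus_cons, if_pos ((hbool "D").mpr h3),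
              if_neg (show ¬ _ = true by rw [hbool "A", h3]; decide),
              if_neg (show ¬ _ = true by rw [hbool "M", h3]; decide),
              if_neg (show ¬ _ = true by rw [hbool "R", h3]; decide),
              if_neg (show ¬ _ = true by rw [hbool "??", h3]; decide)]
            rw [hval]
            simp
          · rw [if_neg h3]
            by_cases h4 : tk = ['R']
            · rw [if_pos h4, ih hpre']
              simp only [pickStatus_cons, if_pos ((hbool "R").mpr h4),
                if_neg (show ¬ _ = true by rw [hbool "A", h4]; decide),
                if_neg (show ¬ _ = true by rw [hbool "M", h4]; decide),
                if_neg (show ¬ _ = true by rw [hbool "D", h4]; decide),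
                if_neg (show ¬ _ = true by rw [hbool "??", h4]; decide)]
              rw [hval]
              simp
            · rw [if_neg h4]
              by_cases h5 : tk = ['?', '?']
              · rw [if_pos h5, ih hpre']
                simp only [pickStatus_cons, if_pos ((hbool "??").mpr h5),
                  if_neg (show ¬ _ = true by rw [hbool "A", h5]; decide),
                  if_neg (show ¬ _ = true by rw [hbool "M", h5]; decide),
                  if_neg (show ¬ _ = true by rw [hbool "D", h5]; decide),
                  if_neg (show ¬ _ = true by rw [hbool "R", h5]; decide)]
                rw [hval]
                simp
              · rw [if_neg h5, ih hpre']
                simp only [pickStatus_cons,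
                  if_neg (show ¬ _ = true by rw [hbool "A"]; exact h1),
                  if_neg (show ¬ _ = true by rw [hbool "M"]; exact h2),
                  if_neg (show ¬ _ = true by rw [hbool "D"]; exact h3),
                  if_neg (show ¬ _ = true by rw [hbool "R"]; exact h4),
                  if_neg (show ¬ _ = true by rw [hbool "??"]; exact h5)]

-- ===== VERDICT (by name: the statement is the Claim_ definition above) =====
theorem categorize_changes_spec : Claim_equal_categorize_changes := by
  intro changes _ hpre
  show categorize_changes changes = categorize_changes_alt changes
  have h0 : (PySem.Dict.ofList
      [("Added", ([] : List String)), ("Modified", []), ("Deleted", []), ("Renamed", []),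
       ("Untracked", [])]) = dcat [] [] [] [] [] := rfl
  rw [categorize_changes, h0, loopA changes hpre, dcat_items]
  simp [categorize_changes_alt, statusTable]
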